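-- pv_equiv track=rewrite | github.com/Quantum-Interns-at-Qualcomm-Institiute/quantum-nonogram-solver | nonogram/data.py | _build_lookup_table
-- ===== SOURCE A (Python) =====
-- def _generate_patterns(line_len: int, clue: tuple[int, ...]) -> list[int]:
--     """Generate all valid bitstring patterns for a line of given length and clue.
--
--     Uses recursive placement: for each block in the clue, try all valid starting
--     positions, then recurse for the remaining blocks in the remaining space.
--
--     Parameters
--     ----------
--     line_len : int
--         Number of cells in the line.
--     clue : tuple[int, ...]
--         Block lengths for this line. (0,) means all empty.
--
--     Returns
--     -------
--     list[int]
--         Valid bitstring patterns as integers (bit index 0 = leftmost cell).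
--     """
--     if clue == (0,) or not clue:
--         return [0]
--
--     results: list[int] = []
--
--     def _place(block_idx: int, start: int, pattern: int) -> None:
--         if block_idx == len(clue):
--             results.append(pattern)
--             return
--
--         block_len = clue[block_idx]
--         remaining_blocks = clue[block_idx + 1 :]
--         min_remaining = sum(remaining_blocks) + len(remaining_blocks)
--
--         for pos in range(start, line_len - block_len - min_remaining + 1):
--             bits = 0
--             for b in range(block_len):
--                 bits |= 1 << pos + b
--             _place(block_idx + 1, pos + block_len + 1, pattern | bits)
--
--     _place(0, 0, 0)
--     return results
--
-- def _generate_all_clues(line_len: int) -> list[tuple[int, ...]]: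
--     """Generate all valid clue combinations for a line of given length.
--
--     A valid clue for a line of length L is any sequence of positive integers
--     (b1, b2, ..., bk) such that sum(bi) + (k-1) <= L, plus the empty clue (0,).
--     """
--     clues: list[tuple[int, ...]] = [(0,)]
--
--     def _recurse(remaining: int, current: list[int]) -> None:
--         if current:
--             clues.append(tuple(current))
--         for block in range(1, remaining + 1):
--             current.append(block)
--             new_remaining = remaining - block - 1
--             if new_remaining >= 0:
--                 _recurse(new_remaining, current)
--             elif new_remaining == -1:
--                 clues.append(tuple(current))
--             current.pop()
--
--     _recurse(line_len, [])
--     return clues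
--
-- def _build_lookup_table(max_line_len: int = 10) -> dict[str, list[int]]:
--     """Build the complete lookup table for line lengths 1 through max_line_len."""
--     table: dict[str, list[int]] = {}
--     for length in range(1, max_line_len + 1):
--         for clue in _generate_all_clues(length):
--             key = f"{length}/{';'.join(map(str, clue))};"
--             patterns = _generate_patterns(length, clue)
--             if patterns:
--                 table[key] = patterns
--     return table
-- ===== SOURCE B (Python) =====
-- def _compositions(r: int) -> list[tuple[int, ...]]:
--     """All block sequences (b1..bk), bi >= 1, sum(bi) + k - 1 <= r, in prefix-DFS order."""
--     out: list[tuple[int, ...]] = []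
--     for b in range(1, r + 1):
--         out.append((b,))
--         out.extend((b,) + t for t in _compositions(r - b - 1))
--     return out
--
--
-- def _patterns(free: int, blocks: list[int]) -> list[int]:
--     """Patterns for the given blocks in a window of `free` cells, relative to the
--     window start: choose the leading gap g, mask the first block, shift the rest."""
--     if not blocks:
--         return [0]
--     b, rest = blocks[0], blocks[1:]
--     need = sum(rest) + len(rest)
--     out: list[int] = []
--     for g in range(0, free - b - need + 1):
--         head = ((1 << b) - 1) << g
--         out.extend(head | (q << (g + b + 1)) for q in _patterns(free - g - b - 1, rest))
--     return out
--
--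
-- def _build_lookup_table(max_line_len: int = 10) -> dict[str, list[int]]:
--     table: dict[str, list[int]] = {}
--     for length in range(1, max_line_len + 1):
--         for clue in [(0,)] + _compositions(length):
--             key = str(length) + "/" + "".join(str(b) + ";" for b in clue)
--             patterns = [0] if clue == (0,) else _patterns(length, list(clue))
--             if patterns:
--                 table[key] = patterns
--     return table
-- ===== Notes on version B (the rewrite author's own statement) =====
-- stated objective: alternative
-- what changed: Replaces A's mutation-based generators (shared-list clue DFS with append/pop, nested _place closure accumulating into results with an inner per-bit OR loop) by pure value-returning recursions: clue suffixes are built as returned lists, and patterns are computed in a window-relative frame (closed-form block mask ((1<<b)-1)<<g, recursive tail shifted by g+b+1) instead of absolute-position accumulation; the key string is built by concatenating 'b;' pieces instead of ';'.join plus a trailing ';'.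
import Mathlib
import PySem

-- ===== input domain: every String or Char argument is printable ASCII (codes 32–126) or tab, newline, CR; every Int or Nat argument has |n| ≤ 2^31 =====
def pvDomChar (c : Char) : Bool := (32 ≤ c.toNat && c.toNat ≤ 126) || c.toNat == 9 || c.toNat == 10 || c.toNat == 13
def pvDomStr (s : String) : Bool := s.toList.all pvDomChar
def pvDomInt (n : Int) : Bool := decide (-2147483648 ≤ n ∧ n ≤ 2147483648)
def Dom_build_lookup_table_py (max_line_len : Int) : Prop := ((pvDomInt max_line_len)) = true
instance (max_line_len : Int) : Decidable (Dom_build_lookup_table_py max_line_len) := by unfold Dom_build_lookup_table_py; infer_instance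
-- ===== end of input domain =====

-- B replaces A's mutation-based clue/pattern generators (shared-list DFS, nested _place closure
-- with a per-bit OR loop) by pure value-returning recursions (window-relative patterns with a
-- closed-form block mask); alternative decomposition, same cost, return value only.

-- ===== PORT A =====
-- `_place` of `_generate_patterns`: the closure's mutable `results` is threaded as an accumulator.
-- On every reachable call the shift amount `pos + b` is nonnegative and the index `block_idx` is in
-- range; `.toNat` / `pyGetD _ _ 0` are totalizations at unreachable points only (Python would raise
-- on a negative shift / out-of-range index).
def pvPlaceA (line_len : Int) (clue : List Int) : Nat → Int → Int → List Int → List Int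
  | i, start, pattern, results =>
    if h : clue.length ≤ i then results ++ [pattern]
    else
      let block_len := PySem.List.pyGetD clue (i : Int) 0
      let remaining_blocks := PySem.List.slice clue (some ((i : Int) + 1)) none
      let min_remaining := remaining_blocks.sum + (remaining_blocks.length : Int)
      (PySem.List.pyRange start (line_len - block_len - min_remaining + 1) 1).foldl
        (fun res pos =>
          let bits := (PySem.List.pyRange 0 block_len 1).foldl
            (fun bits b => PySem.Int.bor bits (1 <<< (pos + b).toNat)) 0
          pvPlaceA line_len clue (i + 1) (pos + block_len + 1) (PySem.Int.bor pattern bits) res)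
        results
  termination_by i _ _ _ => clue.length - i
  decreasing_by omega


def pvGenPatternsA (line_len : Int) (clue : List Int) : List Int :=
  if clue = [0] ∨ clue = [] then [0]
  else pvPlaceA line_len clue 0 0 0 []

-- `_recurse` of `_generate_all_clues`: `clues` is the accumulator; `current ++ [block]` is the
-- Python's append/pop discipline made value-level.
def pvRecurseA (remaining : Int) (current : List Int) (clues : List (List Int)) : List (List Int) :=
  let clues1 := if current ≠ [] then clues ++ [current] else clues
  (PySem.List.pyRange 1 (remaining + 1) 1).attach.foldl
    (fun cl x =>
      let block := x.val
      let nr := remaining - block - 1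
      if 0 ≤ nr then pvRecurseA nr (current ++ [block]) cl
      else if nr = -1 then cl ++ [current ++ [block]]
      else cl)
    clues1
  termination_by remaining.toNat
  decreasing_by
    have hb := PySem.List.mem_pyRange_one.mp x.property
    omega

def pvGenCluesA (line_len : Int) : List (List Int) := pvRecurseA line_len [] [[0]]

def build_lookup_table_py (max_line_len : Int) : List (String × List Int) :=
  ((PySem.List.pyRange 1 (max_line_len + 1) 1).foldl
    (fun table length =>
      (pvGenCluesA length).foldl
        (fun table clue =>
          let key := PySem.Int.toStr length ++ "/" ++ PySem.Str.join ";" (clue.map PySem.Int.toStr) ++ ";"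
          let patterns := pvGenPatternsA length clue
          if patterns ≠ [] then PySem.Dict.insert table key patterns else table)
        table)
    PySem.Dict.empty).items

-- ===== PORT B =====
-- `_compositions`: pure recursion returning the clue suffixes.
def pvCompsB (r : Int) : List (List Int) :=
  (PySem.List.pyRange 1 (r + 1) 1).attach.foldl
    (fun out x =>
      let b := x.val
      out ++ ([b] :: (pvCompsB (r - b - 1)).map (fun t => b :: t)))
    []
  termination_by r.toNat
  decreasing_by
    have hb := PySem.List.mem_pyRange_one.mp x.property
    omega

-- `_patterns`: window-relative; shift amounts are nonnegative on every reachable call.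
def pvPatsB (free : Int) (blocks : List Int) : List Int :=
  match blocks with
  | [] => [0]
  | b :: rest =>
    let need := rest.sum + (rest.length : Int)
    (PySem.List.pyRange 0 (free - b - need + 1) 1).foldl
      (fun out g =>
        let head : Int := ((1 <<< b.toNat) - 1) <<< g.toNat
        out ++ (pvPatsB (free - g - b - 1) rest).map
          (fun q : Int => PySem.Int.bor head (q <<< (g + b + 1).toNat)))
      []

def build_lookup_table_py_alt (max_line_len : Int) : List (String × List Int) :=
  ((PySem.List.pyRange 1 (max_line_len + 1) 1).foldl
    (fun table length =>
      (([0] : List Int) :: pvCompsB length).foldl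
        (fun table clue =>
          let key := PySem.Int.toStr length ++ "/" ++
            PySem.Str.join "" (clue.map (fun b => PySem.Int.toStr b ++ ";"))
          let patterns := if clue = [0] then [0] else pvPatsB length clue
          if patterns ≠ [] then PySem.Dict.insert table key patterns else table)
        table)
    PySem.Dict.empty).items

-- ===== PRECONDITION & SPEC =====
def Spec_build_lookup_table_py (max_line_len : Int) (out : List (String × List Int)) : Prop := out = build_lookup_table_py_alt max_line_len
instance (max_line_len : Int) (out : List (String × List Int)) : Decidable (Spec_build_lookup_table_py max_line_len out) := by unfold Spec_build_lookup_table_py; infer_instance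

-- ===== CLAIM (what is proved, stated in full; the proofs are below) =====
def Claim_equal_build_lookup_table_py : Prop := ∀ (max_line_len : Int), Dom_build_lookup_table_py max_line_len → Spec_build_lookup_table_py max_line_len (build_lookup_table_py max_line_len)

-- ===== LEMMAS AND PROOFS =====

theorem pv_testBit_one (i : Nat) : Nat.testBit 1 i = decide (i = 0) := by
  rw [show (1:Nat) = 2^0 by norm_num, Nat.testBit_two_pow]
  simp [eq_comm]

theorem pv_mask_step (k p : Nat) :
    (2 ^ k - 1) <<< p ||| 1 <<< (p + k) = (2 ^ (k + 1) - 1) <<< p := by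
  apply Nat.eq_of_testBit_eq
  intro i
  simp only [Nat.testBit_or, Nat.testBit_shiftLeft, Nat.testBit_two_pow_sub_one, pv_testBit_one]
  by_cases h1 : p ≤ i <;> by_cases h2 : i - p < k <;> by_cases h3 : p + k ≤ i <;>
    simp [h1, h2, h3] <;> omega

theorem pv_int_mask (k p : Nat) :
    (((1 <<< k) - 1 : Int) <<< p) = (((2 ^ k - 1) <<< p : Nat) : Int) := by
  have h1 : 1 ≤ 2 ^ k := Nat.one_le_two_pow
  have h2 : ((1 <<< k : Nat) : Int) - 1 = ((2 ^ k - 1 : Nat) : Int) := by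
    rw [Nat.shiftLeft_eq, one_mul]; push_cast [h1]; ring
  rw [h2]
  simp [Int.natCast_shiftLeft]

theorem pv_int_mask' (k p : Nat) :
    ((↑(1 <<< k) - 1 : Int) <<< p) = (((1 <<< k - 1) <<< p : Nat) : Int) := by
  rw [pv_int_mask]; norm_num [Nat.shiftLeft_eq]

theorem pv_bits_loop (pos b : Int) (hp : 0 ≤ pos) :
    (PySem.List.pyRange 0 b 1).foldl
      (fun bits j => PySem.Int.bor bits (1 <<< (pos + j).toNat)) 0
    = ((1 <<< b.toNat) - 1 : Int) <<< pos.toNat := by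
  have key : ∀ m : Nat, (PySem.List.pyRange 0 (m : Int) 1).foldl
      (fun bits j => PySem.Int.bor bits (1 <<< (pos + j).toNat)) 0
      = ((1 <<< m) - 1 : Int) <<< pos.toNat := by
    intro m
    induction m with
    | zero => simp [PySem.List.pyRange_one_eq_nil]
    | succ m ih =>
      rw [show ((m+1 : Nat) : Int) = (m : Int) + 1 by push_cast; ring,
          PySem.List.pyRange_one_succ_right (show (0:Int) ≤ (m:Int) by positivity),
          List.foldl_append, ih]
      simp only [List.foldl]
      have hpn : (pos + (m:Int)).toNat = pos.toNat + m := by omega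
      rw [hpn, pv_int_mask, pv_int_mask, PySem.Int.bor_natCast]
      exact congrArg _ (pv_mask_step m pos.toNat)
  rcases le_or_gt b 0 with hb | hb
  · rw [PySem.List.pyRange_one_eq_nil (by omega)]
    have h0 : b.toNat = 0 := by omega
    simp [h0]
  · have hn : b = ((b.toNat : Nat) : Int) := by omega
    rw [hn, key b.toNat, Int.toNat_natCast]

theorem pv_compsB_eq (r : Int) :
    pvCompsB r = (PySem.List.pyRange 1 (r + 1) 1).flatMap
      (fun b => [b] :: (pvCompsB (r - b - 1)).map (fun t => b :: t)) := by
  rw [pvCompsB]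
  rw [List.foldl_attach (f := fun out b => out ++ ([b] :: (pvCompsB (r - b - 1)).map (fun t => b :: t)))]
  rw [PySem.List.foldl_append_eq_flatMap]
  simp

theorem pv_compsB_mem (r : Int) : ∀ c ∈ pvCompsB r, c ≠ [] ∧ ∀ x ∈ c, 1 ≤ x := by
  induction hn : r.toNat using Nat.strong_induction_on generalizing r with
  | _ n ih =>
    intro c hc
    rw [pv_compsB_eq] at hc
    simp only [List.mem_flatMap] at hc
    obtain ⟨b, hb, hcb⟩ := hc
    have hb' := PySem.List.mem_pyRange_one.mp hb
    rcases List.mem_cons.mp hcb with h | h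
    · subst h; exact ⟨by simp, by intro x hx; simp at hx; omega⟩
    · simp only [List.mem_map] at h
      obtain ⟨t, ht, rfl⟩ := h
      have := ih (r - b - 1).toNat (by omega) (r - b - 1) rfl t ht
      refine ⟨by simp, ?_⟩
      intro x hx
      rcases List.mem_cons.mp hx with rfl | hx
      · omega
      · exact this.2 x hx

theorem pv_recurse_eq (r : Int) (current : List Int) (acc : List (List Int)) :
    pvRecurseA r current acc
    = (if current = [] then acc else acc ++ [current]) ++ (pvCompsB r).map (current ++ ·) := by
  induction hn : r.toNat using Nat.strong_induction_on generalizing r current acc with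
  | _ n ih =>
    rw [pvRecurseA]
    rw [List.foldl_attach (f := fun cl block =>
      if 0 ≤ r - block - 1 then pvRecurseA (r - block - 1) (current ++ [block]) cl
      else if r - block - 1 = -1 then cl ++ [current ++ [block]]
      else cl)]
    · have hstep : ∀ (cl : List (List Int)), ∀ b ∈ PySem.List.pyRange 1 (r + 1) 1,
          (if 0 ≤ r - b - 1 then pvRecurseA (r - b - 1) (current ++ [b]) cl
           else if r - b - 1 = -1 then cl ++ [current ++ [b]]
           else cl)
          = cl ++ ((current ++ [b]) :: (pvCompsB (r - b - 1)).map ((current ++ [b]) ++ ·)) := by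
        intro cl b hb
        have hb' := PySem.List.mem_pyRange_one.mp hb
        by_cases h0 : 0 ≤ r - b - 1
        · rw [if_pos h0, ih (r - b - 1).toNat (by omega) _ _ _ rfl]
          simp [List.append_assoc]
        · have hm1 : r - b - 1 = -1 := by omega
          rw [if_neg h0, if_pos hm1, hm1]
          have : pvCompsB (-1) = [] := by
            rw [pv_compsB_eq, PySem.List.pyRange_one_eq_nil (by norm_num)]; rfl
          simp [this]
      have hcongr := PySem.List.foldl_congr_mem
            (l := PySem.List.pyRange 1 (r + 1) 1)
            (init := if current ≠ [] then acc ++ [current] else acc)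
            (f := fun cl block =>
              if 0 ≤ r - block - 1 then pvRecurseA (r - block - 1) (current ++ [block]) cl
              else if r - block - 1 = -1 then cl ++ [current ++ [block]] else cl)
            (g := fun cl b =>
              cl ++ ((current ++ [b]) :: (pvCompsB (r - b - 1)).map ((current ++ [b]) ++ ·)))
            (fun acc x hx => hstep acc x hx)
      rw [hcongr]
      rw [PySem.List.foldl_append_eq_flatMap]
      have hclues1 : (if current ≠ [] then acc ++ [current] else acc)
          = (if current = [] then acc else acc ++ [current]) := by
        by_cases hc : current = [] <;> simp [hc]
      rw [hclues1, pv_compsB_eq r, List.append_cancel_left_eq, List.map_flatMap]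
      congr 1
      funext b
      simp [Function.comp_def]

theorem pv_patsB_nonneg (blocks : List Int) : ∀ (free : Int), ∀ q ∈ pvPatsB free blocks, 0 ≤ q := by
  induction blocks with
  | nil => intro free q hq; simp [pvPatsB] at hq; omega
  | cons b rest ih =>
    intro free q hq
    rw [pvPatsB, PySem.List.foldl_append_eq_flatMap] at hq
    simp only [List.nil_append, List.mem_flatMap, List.mem_map] at hq
    obtain ⟨g, _, q', hq', rfl⟩ := hq
    have h1 : (0:Int) ≤ (((1 <<< b.toNat - 1) <<< g.toNat : Nat) : Int) := by positivity
    have h2 : (0:Int) ≤ q' <<< (g + b + 1).toNat := by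
      rw [Int.shiftLeft_eq]
      have := ih (free - g - b - 1) q' hq'
      positivity
    rw [PySem.Int.bor_of_nonneg h1 h2]
    positivity

theorem pv_nat_rearrange (A M Q s k c : Nat) :
    A ||| (((M <<< k) ||| (Q <<< c)) <<< s) = (A ||| (M <<< (s + k))) ||| (Q <<< (s + c)) := by
  rw [Nat.shiftLeft_or_distrib, ← Nat.shiftLeft_add, ← Nat.shiftLeft_add,
      Nat.add_comm k s, Nat.add_comm c s, Nat.lor_assoc]

theorem pv_bit_rearrange (p q : Int) (mB s k c : Nat) (hp : 0 ≤ p) (hq : 0 ≤ q) :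
    PySem.Int.bor p ((PySem.Int.bor (((1 <<< mB - 1) <<< k : Nat) : Int) (q <<< c)) <<< s)
    = PySem.Int.bor (PySem.Int.bor p (((1 <<< mB - 1) <<< (s + k) : Nat) : Int)) (q <<< (s + c)) := by
  obtain ⟨P, rfl⟩ := Int.eq_ofNat_of_zero_le hp
  obtain ⟨Q, rfl⟩ := Int.eq_ofNat_of_zero_le hq
  rw [← Int.natCast_shiftLeft, ← Int.natCast_shiftLeft, PySem.Int.bor_natCast,
      ← Int.natCast_shiftLeft, PySem.Int.bor_natCast, PySem.Int.bor_natCast]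
  exact congrArg _ (pv_nat_rearrange P (1 <<< mB - 1) Q s k c)

theorem pv_flatMap_congr_mem {β γ : Type} (l : List β) (fA fB : β → List γ)
    (h : ∀ k ∈ l, fA k = fB k) : l.flatMap fA = l.flatMap fB := by
  induction l with
  | nil => rfl
  | cons x xs ih =>
    simp only [List.flatMap_cons]
    rw [h x List.mem_cons_self, ih (fun k hk => h k (List.mem_cons_of_mem _ hk))]

theorem pv_fold_bridge {α β : Type} (l : List β) (F : List α → β → List α)
    (G : List α → β → List α) (res0 : List α) (m : α → α)
    (fA fB : β → List α)
    (hF : ∀ acc k, k ∈ l → F acc k = acc ++ fA k)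
    (hG : ∀ acc k, k ∈ l → G acc k = acc ++ fB k)
    (hfg : ∀ k ∈ l, fA k = (fB k).map m) :
    l.foldl F res0 = res0 ++ (l.foldl G []).map m := by
  have h1 := PySem.List.foldl_congr_mem l F (fun acc k => acc ++ fA k) res0 hF
  have h2 := PySem.List.foldl_congr_mem l G (fun acc k => acc ++ fB k) [] hG
  rw [h1, h2, PySem.List.foldl_append_eq_flatMap, PySem.List.foldl_append_eq_flatMap]
  rw [List.nil_append, List.map_flatMap]
  rw [pv_flatMap_congr_mem l fA _ hfg]

theorem pv_place_eq (L : Int) (clue : List Int) (i : Nat) (start pattern : Int)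
    (results : List Int) (hstart : 0 ≤ start) (hpat : 0 ≤ pattern)
    (hblocks : ∀ x ∈ clue.drop i, 0 ≤ x) :
    pvPlaceA L clue i start pattern results
    = results ++ (pvPatsB (L - start) (clue.drop i)).map
        (fun q : Int => PySem.Int.bor pattern (q <<< start.toNat)) := by
  induction hn : clue.length - i using Nat.strong_induction_on
      generalizing i start pattern results with
  | _ n ih =>
    rw [pvPlaceA]
    by_cases h : clue.length ≤ i
    · rw [dif_pos h, List.drop_eq_nil_of_le h]
      simp [pvPatsB, PySem.Int.bor_zero]
    · rw [dif_neg h]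
      have hi : i < clue.length := by omega
      have hbv : PySem.List.pyGetD clue (i : Int) 0 = clue[i] := by
        rw [PySem.List.pyGetD_natCast, List.getD_eq_getElem _ _ hi]
      have hslice : PySem.List.slice clue (some ((i : Int) + 1)) none = clue.drop (i + 1) := by
        rw [show ((i : Int) + 1) = ((i + 1 : Nat) : Int) by push_cast; ring,
            PySem.List.slice_from_natCast]
      have hdrop : clue.drop i = clue[i] :: clue.drop (i + 1) := List.drop_eq_getElem_cons hi
      have hb0 : 0 ≤ clue[i] := hblocks _ (by rw [hdrop]; exact List.mem_cons_self)
      have hblocks' : ∀ x ∈ clue.drop (i + 1), 0 ≤ x := fun x hx =>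
        hblocks x (by rw [hdrop]; exact List.mem_cons_of_mem _ hx)
      rw [hbv, hslice, hdrop]
      rw [pvPatsB]
      set b := clue[i] with hbdef
      set rest := clue.drop (i + 1) with hrest
      set need := rest.sum + (rest.length : Int) with hneed
      simp only []
      rw [← hneed]
      -- align the two ranges
      have hr1 : PySem.List.pyRange start (L - b - need + 1) 1
          = (List.range ((L - b - need + 1) - start).toNat).map (fun (k : Nat) => start + (k : Int)) :=
        PySem.List.pyRange_one _ _
      have hr2 : PySem.List.pyRange 0 ((L - start) - b - need + 1) 1
          = (List.range ((L - b - need + 1) - start).toNat).map (fun (k : Nat) => 0 + (k : Int)) := by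
        rw [PySem.List.pyRange_one]
        congr 2
        omega
      rw [hr1, hr2, List.foldl_map, List.foldl_map]
      -- A's steps via the induction hypothesis
      have hstep : ∀ (res : List Int), ∀ k ∈ List.range ((L - b - need + 1) - start).toNat,
          (fun res (k : Nat) =>
            pvPlaceA L clue (i + 1) (start + (k : Int) + b + 1)
              (PySem.Int.bor pattern
                ((PySem.List.pyRange 0 b 1).foldl
                  (fun bits j => PySem.Int.bor bits (1 <<< ((start + (k : Int)) + j).toNat)) 0))
              res) res k
          = res ++ (pvPatsB (L - (start + (k : Int) + b + 1)) rest).map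
              (fun q : Int => PySem.Int.bor
                (PySem.Int.bor pattern (((1 <<< b.toNat - 1) <<< (start.toNat + k) : Nat) : Int))
                (q <<< (start.toNat + (k + b.toNat + 1)))) := by
        intro res k hk
        simp only []
        have hpos : (0:Int) ≤ start + (k : Int) := by positivity
        have hbits := pv_bits_loop (start + (k : Int)) b hpos
        have htn : (start + (k : Int)).toNat = start.toNat + k := by omega
        rw [hbits, pv_int_mask', htn]
        have hp2 : (0:Int) ≤ PySem.Int.bor pattern (((1 <<< b.toNat - 1) <<< (start.toNat + k) : Nat) : Int) := by
          rw [PySem.Int.bor_of_nonneg hpat (by positivity)]; positivity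
        rw [ih (clue.length - (i + 1)) (by omega) (i + 1) _ _ res (by positivity) hp2 hblocks' rfl]
        rw [← hrest]
        congr 1
        apply List.map_congr_left
        intro q hq
        have : (start + (k : Int) + b + 1).toNat = start.toNat + (k + b.toNat + 1) := by omega
        rw [this]
      refine pv_fold_bridge _ _ _ _ _ _ _ hstep (fun acc k hk => rfl) ?_
      intro k hk
      have hk1 : ((0:Int) + (k:Int)).toNat = k := by omega
      have hk2 : ((0:Int) + (k:Int) + b + 1).toNat = k + b.toNat + 1 := by omega
      have harg : L - start - (0 + (k:Int)) - b - 1 = L - (start + (k:Int) + b + 1) := by ring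
      simp only [hk1, hk2, harg, List.map_map]
      apply List.map_congr_left
      intro q hq
      have hqn : 0 ≤ q := pv_patsB_nonneg rest _ q hq
      simp only [Function.comp_def]
      exact (pv_bit_rearrange pattern q b.toNat start.toNat k (k + b.toNat + 1) hpat hqn).symm

theorem pv_genPatterns_eq (L : Int) (clue : List Int)
    (hclue : clue = [0] ∨ (clue ≠ [] ∧ ∀ x ∈ clue, 1 ≤ x)) :
    pvGenPatternsA L clue = if clue = [0] then [0] else pvPatsB L clue := by
  rcases hclue with h | ⟨hne, hpos⟩
  · rw [pvGenPatternsA, if_pos (Or.inl h), if_pos h]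
  · have h0 : clue ≠ [0] := by
      intro hc; subst hc; have := hpos 0 (by simp); omega
    rw [pvGenPatternsA, if_neg (by tauto), if_neg h0]
    rw [pv_place_eq L clue 0 0 0 [] le_rfl le_rfl
        (by simpa using fun x hx => le_trans (by norm_num) (hpos x hx))]
    simp [PySem.Int.bor_comm]

theorem pv_join_nil_cons (p : List Char) (rest : List (List Char)) :
    PySem.Chars.join [] (p :: rest) = p ++ PySem.Chars.join [] rest := by
  cases rest with
  | nil => rw [PySem.Chars.join_singleton, PySem.Chars.join_nil, List.append_nil]
  | cons q t => rw [PySem.Chars.join_cons_cons]; simp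

theorem pv_chars_key (l : List (List Char)) (hne : l ≠ []) :
    PySem.Chars.join [';'] l ++ [';'] = PySem.Chars.join [] (l.map (· ++ [';'])) := by
  induction l with
  | nil => exact absurd rfl hne
  | cons x t ih =>
    cases t with
    | nil => simp [PySem.Chars.join_singleton]
    | cons y s =>
      rw [PySem.Chars.join_cons_cons, List.map_cons, pv_join_nil_cons, ← ih (by simp)]
      simp

theorem pv_key_eq (clue : List Int) (hne : clue ≠ []) :
    PySem.Str.join ";" (clue.map PySem.Int.toStr) ++ ";"
    = PySem.Str.join "" (clue.map (fun b => PySem.Int.toStr b ++ ";")) := by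
  apply String.toList_inj.mp
  rw [String.toList_append, PySem.Str.toList_join, PySem.Str.toList_join]
  have h1 : (";" : String).toList = [';'] := rfl
  have h2 : ("" : String).toList = [] := rfl
  rw [h1, h2, List.map_map, List.map_map]
  have h3 : (String.toList ∘ fun b => PySem.Int.toStr b ++ ";")
      = (fun b => (PySem.Int.toStr b).toList ++ [';']) := by
    funext b; simp [String.toList_append, h1]
  rw [h3]
  have h4 : (List.map (fun b => (PySem.Int.toStr b).toList ++ [';']) clue)
      = (List.map (String.toList ∘ PySem.Int.toStr) clue).map (· ++ [';']) := by
    simp [List.map_map]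
  rw [h4]
  exact pv_chars_key _ (by simpa using hne)

theorem pv_clues_eq (L : Int) : pvGenCluesA L = ([0] : List Int) :: pvCompsB L := by
  rw [pvGenCluesA, pv_recurse_eq]
  simp

theorem pv_build_eq (n : Int) : build_lookup_table_py n = build_lookup_table_py_alt n := by
  rw [build_lookup_table_py, build_lookup_table_py_alt]
  congr 1
  apply PySem.List.foldl_congr_mem
  intro table length _
  rw [pv_clues_eq]
  apply PySem.List.foldl_congr_mem
  intro tbl clue hclue
  have hcl : clue = [0] ∨ (clue ≠ [] ∧ ∀ x ∈ clue, 1 ≤ x) := by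
    rcases List.mem_cons.mp hclue with h | h
    · exact Or.inl h
    · exact Or.inr (pv_compsB_mem length clue h)
  have hne : clue ≠ [] := by
    rcases hcl with h | h
    · subst h; simp
    · exact h.1
  simp only []
  rw [pv_genPatterns_eq length clue hcl]
  have hkey : PySem.Int.toStr length ++ "/" ++ PySem.Str.join ";" (clue.map PySem.Int.toStr) ++ ";"
      = PySem.Int.toStr length ++ "/" ++ PySem.Str.join "" (clue.map (fun b => PySem.Int.toStr b ++ ";")) := by
    rw [show PySem.Int.toStr length ++ "/" ++ PySem.Str.join ";" (clue.map PySem.Int.toStr) ++ ";"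
        = PySem.Int.toStr length ++ "/" ++ (PySem.Str.join ";" (clue.map PySem.Int.toStr) ++ ";") by
      simp [String.append_assoc]]
    rw [pv_key_eq clue hne]
  rw [hkey]

-- ===== VERDICT (by name: the statement is the Claim_ definition above) =====
theorem build_lookup_table_py_spec : Claim_equal_build_lookup_table_py := by
  intro n _
  unfold Spec_build_lookup_table_py
  exact pv_build_eq n
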